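-- pv_equiv track=rewrite | github.com/jina-ai/executors | jinahub/indexers/storage/PostgreSQLStorage/postgres_indexer.py | _vshards_to_get
-- ===== SOURCE A (Python) =====
-- def _vshards_to_get(shard_id, total_shards, virtual_shards):
--     if shard_id > total_shards - 1:
--         raise ValueError(
--             'shard_id should be 0-indexed out ' 'of range(total_shards)'
--         )
--     vshards = list(range(virtual_shards))
--     vshard_part = (
--         virtual_shards // total_shards
--     )  # nr of virtual shards given to one shard
--     vshard_remainder = virtual_shards % total_shards
--     if shard_id == total_shards - 1:
--         shards_to_get = vshards[
--             shard_id
--             * vshard_part : ((shard_id + 1) * vshard_part + vshard_remainder)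
--         ]
--     else:
--         shards_to_get = vshards[
--             shard_id * vshard_part : (shard_id + 1) * vshard_part
--         ]
--     return [str(shard_id) for shard_id in shards_to_get]
-- ===== SOURCE B (Python) =====
-- def _vshards_to_get(shard_id, total_shards, virtual_shards):
--     # Inverse-mapping: each virtual shard i is owned by shard min(i // part, last)
--     # (all of them by the last shard when part == 0); collect the ids owned by shard_id.
--     if not 0 <= shard_id < total_shards:
--         raise ValueError(
--             'shard_id should be 0-indexed out ' 'of range(total_shards)'
--         )
--     part = virtual_shards // total_shards
--     last = total_shards - 1
--     owner = lambda i: last if part == 0 else min(i // part, last)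
--     return [str(i) for i in range(virtual_shards) if owner(i) == shard_id]
-- ===== Notes on version B (the rewrite author's own statement) =====
-- stated objective: alternative
-- what changed: B inverts the mapping: instead of materialising list(range(virtual_shards)) and slicing out this shard's block, it filters range(virtual_shards) by an ownership predicate (vshard i belongs to shard min(i//part, last), all to the last when part==0); Pre_ restricts to the natural domain 0 <= shard_id < total_shards named by A's own error message, excluding inputs with negative shard_id or total_shards where A's returned slice is an accident of negative-index wraparound (B raises ValueError there).
-- outside the precondition, e.g. on _vshards_to_get(-2, 3, 10): A returns ['4', '5', '6'], B raises ValueError; on _vshards_to_get(-3, -2, 5): A returns [], B raises ValueError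
import Mathlib
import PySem

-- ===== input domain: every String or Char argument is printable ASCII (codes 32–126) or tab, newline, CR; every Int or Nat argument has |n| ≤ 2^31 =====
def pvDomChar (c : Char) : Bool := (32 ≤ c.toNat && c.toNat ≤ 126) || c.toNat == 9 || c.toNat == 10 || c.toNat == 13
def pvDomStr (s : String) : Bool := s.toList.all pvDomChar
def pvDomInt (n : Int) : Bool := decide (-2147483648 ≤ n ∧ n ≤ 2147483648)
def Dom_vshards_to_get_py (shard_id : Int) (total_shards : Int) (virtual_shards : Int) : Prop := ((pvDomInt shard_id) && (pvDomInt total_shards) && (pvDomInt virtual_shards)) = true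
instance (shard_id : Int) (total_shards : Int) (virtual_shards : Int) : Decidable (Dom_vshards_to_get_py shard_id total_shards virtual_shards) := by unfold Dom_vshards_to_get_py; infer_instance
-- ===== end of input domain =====

-- B replaces the materialise-and-slice with an inverse mapping: it filters range(virtual_shards)
-- by an ownership predicate (which shard owns each virtual shard) — an alternative decomposition,
-- same asymptotic cost; Pre_ restricts to the natural domain 0 ≤ shard_id < total_shards.


-- ===== PORT A =====
def vshards_to_get_py (shard_id : Int) (total_shards : Int) (virtual_shards : Int) : List String :=
  -- the 'shard_id > total_shards - 1' ValueError (and total_shards = 0 ZeroDivisionError) is excluded by Pre_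
  let vshards := PySem.List.pyRange 0 virtual_shards 1
  let vshard_part := PySem.Int.floordiv virtual_shards total_shards
  let vshard_remainder := PySem.Int.mod virtual_shards total_shards
  let shards_to_get :=
    if shard_id == total_shards - 1 then
      PySem.List.slice vshards (some (shard_id * vshard_part))
        (some ((shard_id + 1) * vshard_part + vshard_remainder))
    else
      PySem.List.slice vshards (some (shard_id * vshard_part))
        (some ((shard_id + 1) * vshard_part))
  shards_to_get.map PySem.Int.toStr

-- ===== PORT B =====
def vshards_to_get_py_alt (shard_id : Int) (total_shards : Int) (virtual_shards : Int) : List String :=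
  -- B's ValueError on ¬(0 ≤ shard_id < total_shards) is excluded by Pre_
  let part := PySem.Int.floordiv virtual_shards total_shards
  let last := total_shards - 1
  let owner := fun (i : Int) => if part == 0 then last else min (PySem.Int.floordiv i part) last
  ((PySem.List.pyRange 0 virtual_shards 1).filter (fun i => owner i == shard_id)).map PySem.Int.toStr

-- ===== PRECONDITION & SPEC =====
-- Pre_ is the natural domain named by A's own error message ('shard_id should be 0-indexed out of
-- range(total_shards)'): 0 ≤ shard_id < total_shards.  It excludes where A raises (shard_id > total_shards - 1:
-- ValueError; total_shards = 0: ZeroDivisionError) and also negative shard_id / total_shards, on which A still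
-- returns but the value is an accident of Python's negative-index slice wraparound; B raises ValueError there.
def Pre_vshards_to_get_py (shard_id : Int) (total_shards : Int) (virtual_shards : Int) : Prop :=
  0 ≤ shard_id ∧ shard_id < total_shards
instance (shard_id : Int) (total_shards : Int) (virtual_shards : Int) : Decidable (Pre_vshards_to_get_py shard_id total_shards virtual_shards) := by unfold Pre_vshards_to_get_py; infer_instance
def pvWitness_vshards_to_get_py : Int × Int × Int := (1, 3, 10)

def Spec_vshards_to_get_py (shard_id : Int) (total_shards : Int) (virtual_shards : Int) (out : List String) : Prop := out = vshards_to_get_py_alt shard_id total_shards virtual_shards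
instance (shard_id : Int) (total_shards : Int) (virtual_shards : Int) (out : List String) : Decidable (Spec_vshards_to_get_py shard_id total_shards virtual_shards out) := by unfold Spec_vshards_to_get_py; infer_instance

-- ===== CLAIM (what is proved, stated in full; the proofs are below) =====
def Claim_equal_vshards_to_get_py : Prop := ∀ (shard_id : Int) (total_shards : Int) (virtual_shards : Int), Dom_vshards_to_get_py shard_id total_shards virtual_shards → Pre_vshards_to_get_py shard_id total_shards virtual_shards → Spec_vshards_to_get_py shard_id total_shards virtual_shards (vshards_to_get_py shard_id total_shards virtual_shards)

-- ===== LEMMAS AND PROOFS =====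

-- Python slice clamping expressed over Int.
lemma clampIdx_eq_int (v i : Int) :
    ((PySem.List.clampIdx v.toNat i : Nat) : Int)
      = if i < 0 then max (i + max v 0) 0 else min i (max v 0) := by
  unfold PySem.List.clampIdx
  split_ifs <;> omega

-- A slice of range(v) is itself a range between the clamped bounds.
lemma slice_pyRange_eq (v a b : Int) :
    PySem.List.slice (PySem.List.pyRange 0 v 1) (some a) (some b)
      = PySem.List.pyRange ((PySem.List.clampIdx v.toNat a : Nat) : Int)
          ((PySem.List.clampIdx v.toNat b : Nat) : Int) 1 := by
  unfold PySem.List.slice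
  have hlen : (PySem.List.pyRange 0 v 1).length = v.toNat := by
    simp [PySem.List.length_pyRange_one]
  rw [hlen]
  apply List.ext_getElem
  · simp [PySem.List.length_pyRange_one]
  · intro k h1 h2
    simp only [List.getElem_take, List.getElem_drop, PySem.List.getElem_pyRange_one]
    have hk : ((PySem.List.clampIdx v.toNat a : Nat) : Int) + k = 0 + ((PySem.List.clampIdx v.toNat a + k : Nat) : Int) := by push_cast; ring
    rw [hk]

-- Filtering range(0,v) by an interval membership predicate yields the interval range.
lemma filter_pyRange_interval (p : Int → Bool) (v lo hi : Int)
    (h0 : 0 ≤ lo) (hlh : lo ≤ hi) (hv : hi ≤ v)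
    (hp : ∀ i, 0 ≤ i → i < v → (p i = decide (lo ≤ i ∧ i < hi))) :
    (PySem.List.pyRange 0 v 1).filter p = PySem.List.pyRange lo hi 1 := by
  rw [PySem.List.pyRange_one_append 0 lo v h0 (le_trans hlh hv),
      PySem.List.pyRange_one_append lo hi v hlh hv]
  rw [List.filter_append, List.filter_append]
  have h1 : (PySem.List.pyRange 0 lo 1).filter p = [] := by
    apply List.filter_eq_nil_iff.mpr
    intro i hi'
    rw [PySem.List.mem_pyRange_one] at hi'
    rw [hp i hi'.1 (by omega)]
    simp; omega
  have h2 : (PySem.List.pyRange lo hi 1).filter p = PySem.List.pyRange lo hi 1 := by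
    apply List.filter_eq_self.mpr
    intro i hi'
    rw [PySem.List.mem_pyRange_one] at hi'
    rw [hp i (by omega) (by omega)]
    simp; omega
  have h3 : (PySem.List.pyRange hi v 1).filter p = [] := by
    apply List.filter_eq_nil_iff.mpr
    intro i hi'
    rw [PySem.List.mem_pyRange_one] at hi'
    rw [hp i (by omega) hi'.2]
    simp; omega
  rw [h1, h2, h3]
  simp

-- ===== VERDICT (by name: the statement is the Claim_ definition above) =====
theorem vshards_to_get_py_spec : Claim_equal_vshards_to_get_py := by
  intro s t v _ hpre
  obtain ⟨hs0, hst⟩ := hpre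
  have ht : 0 < t := by omega
  unfold Spec_vshards_to_get_py vshards_to_get_py vshards_to_get_py_alt
  simp only
  set part := PySem.Int.floordiv v t with hpart
  have hdm := PySem.Int.floordiv_mul_add_mod v t
  -- dispose of v ≤ 0: both sides are the empty list
  by_cases hv : v ≤ 0
  · have hr : PySem.List.pyRange 0 v 1 = [] := PySem.List.pyRange_one_eq_nil hv
    rw [hr]
    simp [PySem.List.slice]
  rw [not_le] at hv
  have hpartnn : 0 ≤ part := by
    rw [hpart]
    rw [show (0:Int) = 0 from rfl]
    exact (PySem.Int.le_floordiv_iff_mul_le ht).mpr (by omega)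
  have hmodnn : 0 ≤ PySem.Int.mod v t := PySem.Int.mod_nonneg v ht
  have hmodlt : PySem.Int.mod v t < t := PySem.Int.mod_lt v ht
  congr 1
  by_cases hlast : s = t - 1
  · -- last shard: A takes [s*part, v); B keeps i with owner i = s, i.e. i ≥ s*part
    subst hlast
    simp only [beq_self_eq_true, if_true]
    have hstop : ((t - 1) + 1) * part + PySem.Int.mod v t = v := by ring_nf; ring_nf at hdm; linarith
    rw [slice_pyRange_eq, clampIdx_eq_int, clampIdx_eq_int, hstop]
    have hle : (t - 1) * part ≤ v := by nlinarith
    have hb1 : (if ((t:Int) - 1) * part < 0 then max ((t - 1) * part + max v 0) 0 else min ((t - 1) * part) (max v 0)) = (t - 1) * part := by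
      have : 0 ≤ (t - 1) * part := by positivity
      split_ifs <;> omega
    have hb2 : (if v < 0 then max (v + max v 0) 0 else min v (max v 0)) = v := by
      split_ifs <;> omega
    rw [hb1, hb2]
    symm
    apply filter_pyRange_interval _ v ((t - 1) * part) v (by positivity) hle (le_refl v)
    intro i hi0 hiv
    by_cases hp0 : part = 0
    · -- part = 0: the last shard owns everything; and (t-1)*part = 0 ≤ i
      simp [hp0]
      omega
    · have hp1 : 0 < part := by omega
      have hbf : (part == 0) = false := by simp [hp0]
      simp only [hbf, Bool.false_eq_true, if_false]
      apply Bool.eq_iff_iff.mpr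
      simp only [beq_iff_eq, decide_eq_true_eq]
      constructor
      · intro h
        have : (t:Int) - 1 ≤ PySem.Int.floordiv i part := by omega
        constructor
        · calc (t - 1) * part ≤ PySem.Int.floordiv i part * part := by nlinarith
            _ ≤ i := by
              have := PySem.Int.floordiv_mul_add_mod i part
              have := PySem.Int.mod_nonneg i hp1
              omega
        · exact hiv
      · intro ⟨h1, _⟩
        have : (t:Int) - 1 ≤ PySem.Int.floordiv i part := (PySem.Int.le_floordiv_iff_mul_le hp1).mpr (by linarith)
        omega
  · -- not the last shard: A takes [s*part, (s+1)*part); B keeps i with i // part = s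
    have hne : (s == t - 1) = false := by simp [hlast]
    simp only [hne, Bool.false_eq_true, if_false]
    rw [slice_pyRange_eq, clampIdx_eq_int, clampIdx_eq_int]
    have hst' : s + 1 ≤ t - 1 := by omega
    have hub : (s + 1) * part ≤ v := by nlinarith
    have hb1 : (if s * part < 0 then max (s * part + max v 0) 0 else min (s * part) (max v 0)) = s * part := by
      have h1 : 0 ≤ s * part := by positivity
      have h2 : s * part ≤ (s + 1) * part := by nlinarith
      split_ifs <;> omega
    have hb2 : (if (s + 1) * part < 0 then max ((s + 1) * part + max v 0) 0 else min ((s + 1) * part) (max v 0)) = (s + 1) * part := by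
      have : 0 ≤ (s + 1) * part := by positivity
      split_ifs <;> omega
    rw [hb1, hb2]
    symm
    apply filter_pyRange_interval _ v (s * part) ((s + 1) * part) (by positivity) (by nlinarith) hub
    intro i hi0 hiv
    by_cases hp0 : part = 0
    · -- part = 0: everything belongs to the last shard, s ≠ t-1 keeps nothing, interval is empty
      rw [hp0]
      apply Bool.eq_iff_iff.mpr
      simp only [beq_self_eq_true, if_true, beq_iff_eq, decide_eq_true_eq]
      constructor
      · intro h; exact absurd h.symm hlast
      · intro h; omega
    · have hp1 : 0 < part := by omega
      have hbf : (part == 0) = false := by simp [hp0]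
      simp only [hbf, Bool.false_eq_true, if_false]
      apply Bool.eq_iff_iff.mpr
      simp only [beq_iff_eq, decide_eq_true_eq]
      constructor
      · intro h
        have hfs : PySem.Int.floordiv i part = s := by omega
        have hdmi := PySem.Int.floordiv_mul_add_mod i part
        have hm0 := PySem.Int.mod_nonneg i hp1
        have hm1 := PySem.Int.mod_lt i hp1
        constructor <;> nlinarith [hfs]
      · intro ⟨h1, h2⟩
        have ha : s ≤ PySem.Int.floordiv i part := (PySem.Int.le_floordiv_iff_mul_le hp1).mpr (by linarith)
        have hb : PySem.Int.floordiv i part < s + 1 := (PySem.Int.floordiv_lt_iff_lt_mul hp1).mpr (by linarith)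
        have : PySem.Int.floordiv i part = s := by omega
        omega
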